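-- pv_equiv track=rewrite | github.com/rubygitflow/leetcode_python | best_time_to_buy_and_sell_stock.py | __makeDeals
-- ===== SOURCE A (Python) =====
-- from typing import List
--
-- def __makeDeals(prices: List[int]) -> List[int]:
--     deals = [[prices[i - 1], prices[i]] for i in range(1, len(prices)) if prices[i] > prices[i - 1]]
--     if not deals: return []
--     merged_deals = [deals[0]]
--     for i in range(1, len(deals)):
--         if deals[i][0] == merged_deals[-1][1]:
--             merged_deals[-1][1] = deals[i][1]
--         else:
--             merged_deals.append(deals[i])
--     return merged_deals
-- ===== SOURCE B (Python) =====
-- from typing import List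
--
-- def __makeDeals(prices: List[int]) -> List[int]:
--     # single pass: build and merge increasing intervals in one scan
--     merged = []
--     for i in range(1, len(prices)):
--         if prices[i] > prices[i - 1]:
--             if merged and merged[-1][1] == prices[i - 1]:
--                 merged[-1][1] = prices[i]
--             else:
--                 merged.append([prices[i - 1], prices[i]])
--     return merged
-- ===== Notes on version B (the rewrite author's own statement) =====
-- stated objective: simpler
-- what changed: B fuses A's two phases (comprehension building a 'deals' list, then a separate merge loop) into one scan over prices that builds and merges intervals simultaneously, with no intermediate list.
import Mathlib
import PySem

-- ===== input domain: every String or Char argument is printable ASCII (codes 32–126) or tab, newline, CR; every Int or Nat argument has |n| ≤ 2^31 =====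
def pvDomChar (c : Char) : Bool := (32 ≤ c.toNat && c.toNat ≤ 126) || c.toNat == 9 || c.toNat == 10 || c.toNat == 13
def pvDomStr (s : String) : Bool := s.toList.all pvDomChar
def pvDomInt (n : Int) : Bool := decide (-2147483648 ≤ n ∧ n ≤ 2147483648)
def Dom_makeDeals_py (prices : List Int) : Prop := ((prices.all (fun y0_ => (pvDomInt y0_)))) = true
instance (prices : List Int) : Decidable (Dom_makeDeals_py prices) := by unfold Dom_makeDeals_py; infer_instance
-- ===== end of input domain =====

-- B fuses A's two phases (build the 'deals' list, then merge) into one scan; objective: simpler.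
-- Both ports represent the Python 2-element list [a, b] as the pair (a, b) (mutation of deal[1]
-- becomes replacing the pair's second component) and convert to [a, b] at return; the growing
-- merged list is kept reversed (head = Python's merged[-1]) and reversed at the end.

-- ===== PORT A =====
-- merge step of A's second loop: Python's 'if deals[i][0] == merged_deals[-1][1]: merged_deals[-1][1] = deals[i][1] else: merged_deals.append(deals[i])'
def pvStepA (m : List (Int × Int)) (d : Int × Int) : List (Int × Int) :=
  match m with
  | (a, b) :: rest => if d.1 = b then (a, d.2) :: rest else d :: (a, b) :: rest
  | [] => [d]   -- unreachable in A (the loop starts with merged_deals = [deals[0]])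

def makeDeals_py (prices : List Int) : List (List Int) :=
  -- deals = [[prices[i-1], prices[i]] for i in range(1, len(prices)) if prices[i] > prices[i-1]]
  -- (indices i-1, i are always in range here, so pyGetD's default 0 is never used)
  let deals : List (Int × Int) :=
    (PySem.List.pyRange 1 prices.length 1).foldl
      (fun acc i =>
        if PySem.List.pyGetD prices i 0 > PySem.List.pyGetD prices (i - 1) 0 then
          acc ++ [(PySem.List.pyGetD prices (i - 1) 0, PySem.List.pyGetD prices i 0)]
        else acc) []
  match deals with
  | [] => []                                          -- if not deals: return []
  | d :: rest =>
      ((rest.foldl pvStepA [d]).map (fun p => [p.1, p.2])).reverse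

-- ===== PORT B =====
def makeDeals_py_alt (prices : List Int) : List (List Int) :=
  -- one scan: for i in range(1, len(prices)): if rising, merge into merged[-1] or append
  let merged : List (Int × Int) :=
    (PySem.List.pyRange 1 prices.length 1).foldl
      (fun m i =>
        let q := PySem.List.pyGetD prices (i - 1) 0
        let p := PySem.List.pyGetD prices i 0
        if p > q then
          match m with
          | (a, b) :: rest => if b = q then (a, p) :: rest else (q, p) :: (a, b) :: rest
          | [] => [(q, p)]
        else m) []
  (merged.map (fun p => [p.1, p.2])).reverse

-- ===== PRECONDITION & SPEC =====
def Spec_makeDeals_py (prices : List Int) (out : List (List Int)) : Prop := out = makeDeals_py_alt prices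
instance (prices : List Int) (out : List (List Int)) : Decidable (Spec_makeDeals_py prices out) := by unfold Spec_makeDeals_py; infer_instance

-- ===== CLAIM (what is proved, stated in full; the proofs are below) =====
def Claim_equal_makeDeals_py : Prop := ∀ (prices : List Int), Dom_makeDeals_py prices → Spec_makeDeals_py prices (makeDeals_py prices)

-- ===== LEMMAS AND PROOFS =====

-- B's fused step equals pvStepA applied to the fresh deal pair (when rising), else identity.
theorem pvStepB_eq (prices : List Int) (m : List (Int × Int)) (i : Int) :
    (let q := PySem.List.pyGetD prices (i - 1) 0
     let p := PySem.List.pyGetD prices i 0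
     if p > q then
       match m with
       | (a, b) :: rest => if b = q then (a, p) :: rest else (q, p) :: (a, b) :: rest
       | [] => [(q, p)]
     else m)
    = (if PySem.List.pyGetD prices i 0 > PySem.List.pyGetD prices (i - 1) 0 then
         pvStepA m (PySem.List.pyGetD prices (i - 1) 0, PySem.List.pyGetD prices i 0)
       else m) := by
  simp only [pvStepA]
  split_ifs with h
  · cases m with
    | nil => rfl
    | cons hd tl =>
        cases hd with
        | mk a b => simp only [eq_comm]
  · rfl

-- fusing lemma: running A's merge fold over A's deals-accumulator equals B's fused fold
theorem fuse (l : List Int) (prices : List Int) :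
    ∀ (acc m : List (Int × Int)),
      (l.foldl
        (fun acc i =>
          if PySem.List.pyGetD prices i 0 > PySem.List.pyGetD prices (i - 1) 0 then
            acc ++ [(PySem.List.pyGetD prices (i - 1) 0, PySem.List.pyGetD prices i 0)]
          else acc) acc).foldl pvStepA m
      = l.foldl
          (fun m i =>
            let q := PySem.List.pyGetD prices (i - 1) 0
            let p := PySem.List.pyGetD prices i 0
            if p > q then
              match m with
              | (a, b) :: rest => if b = q then (a, p) :: rest else (q, p) :: (a, b) :: rest
              | [] => [(q, p)]
            else m) (acc.foldl pvStepA m) := by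
  induction l with
  | nil => intro acc m; rfl
  | cons i l ih =>
      intro acc m
      simp only [List.foldl_cons]
      rw [ih]
      congr 1
      rw [pvStepB_eq prices (acc.foldl pvStepA m) i]
      split_ifs with h
      · rw [List.foldl_append]; rfl
      · rfl

theorem foldl_stepA_nil (ds : List (Int × Int)) :
    ds.foldl pvStepA [] = match ds with
      | [] => []
      | d :: rest => rest.foldl pvStepA [d] := by
  cases ds <;> rfl

-- ===== VERDICT (by name: the statement is the Claim_ definition above) =====
theorem makeDeals_py_spec : Claim_equal_makeDeals_py := by
  intro prices _
  unfold Spec_makeDeals_py makeDeals_py makeDeals_py_alt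
  have h := fuse (PySem.List.pyRange 1 prices.length 1) prices [] []
  simp only [List.foldl_nil] at h
  rw [← h, foldl_stepA_nil]
  cases hd :
      (PySem.List.pyRange 1 prices.length 1).foldl
        (fun acc i =>
          if PySem.List.pyGetD prices i 0 > PySem.List.pyGetD prices (i - 1) 0 then
            acc ++ [(PySem.List.pyGetD prices (i - 1) 0, PySem.List.pyGetD prices i 0)]
          else acc) [] with
  | nil => rfl
  | cons d rest => rfl
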